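-- pv_equiv track=rewrite | github.com/derRuedi/Advent-of-Code | 2020/day17.py | create_points_in_cube
-- ===== SOURCE A (Python) =====
-- def create_points_in_cube(cube):
-- 	cube_size = range(0, len(cube))
-- 	points = []
--
-- 	for z in cube_size:
-- 		for y in cube_size:
-- 			for x in cube_size:
-- 				points.append( [x, y, z] )
-- 	return points
-- ===== SOURCE B (Python) =====
-- def create_points_in_cube(cube):
-- 	n = len(cube)
-- 	points = []
-- 	for i in range(n * n * n):
-- 		points.append([i % n, (i // n) % n, i // (n * n)])
-- 	return points
-- ===== Notes on version B (the rewrite author's own statement) =====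
-- stated objective: alternative
-- what changed: Replaces the three nested loops over range(len(cube)) by a single loop over a flat index i in range(n**3), decoding x=i%n, y=(i//n)%n, z=i//(n*n), so only one running index is maintained instead of three loop variables.
import Mathlib
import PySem

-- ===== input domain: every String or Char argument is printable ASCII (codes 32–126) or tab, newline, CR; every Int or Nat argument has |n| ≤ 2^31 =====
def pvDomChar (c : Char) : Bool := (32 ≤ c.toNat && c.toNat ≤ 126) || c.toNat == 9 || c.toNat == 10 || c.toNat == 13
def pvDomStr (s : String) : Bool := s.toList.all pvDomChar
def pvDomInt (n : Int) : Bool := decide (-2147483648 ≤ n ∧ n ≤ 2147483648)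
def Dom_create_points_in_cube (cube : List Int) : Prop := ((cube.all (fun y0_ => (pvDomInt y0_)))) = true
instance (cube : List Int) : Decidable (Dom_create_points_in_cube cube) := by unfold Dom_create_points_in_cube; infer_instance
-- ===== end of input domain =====

-- B replaces the three nested loops by one loop over a flat index with modulo decoding (alternative decomposition, same cost).

-- ===== PORT A =====
def create_points_in_cube (cube : List Int) : List (List Int) :=
  let cube_size := PySem.List.pyRange 0 (cube.length : Int) 1
  cube_size.foldl (fun points z =>
    cube_size.foldl (fun points y =>
      cube_size.foldl (fun points x => points ++ [[x, y, z]]) points) points) []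

-- ===== PORT B =====
def create_points_in_cube_alt (cube : List Int) : List (List Int) :=
  let n : Int := (cube.length : Int)
  (PySem.List.pyRange 0 (n * n * n) 1).foldl
    (fun points i =>
      points ++ [[PySem.Int.mod i n, PySem.Int.mod (PySem.Int.floordiv i n) n,
                  PySem.Int.floordiv i (n * n)]]) []

-- ===== PRECONDITION & SPEC =====
def Spec_create_points_in_cube (cube : List Int) (out : List (List Int)) : Prop := out = create_points_in_cube_alt cube
instance (cube : List Int) (out : List (List Int)) : Decidable (Spec_create_points_in_cube cube out) := by unfold Spec_create_points_in_cube; infer_instance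

-- ===== CLAIM (what is proved, stated in full; the proofs are below) =====
def Claim_equal_create_points_in_cube : Prop := ∀ (cube : List Int), Dom_create_points_in_cube cube → Spec_create_points_in_cube cube (create_points_in_cube cube)

-- ===== LEMMAS AND PROOFS =====

-- Splitting a flat range of n*a indices into n consecutive blocks of a.
theorem pv_seg {α : Type} (g : ℕ → α) (a : ℕ) :
    ∀ n : ℕ, (List.range (n * a)).map g
      = (List.range n).flatMap (fun q => (List.range a).map (fun r => g (q * a + r)))
  | 0 => by simp
  | n + 1 => by
    rw [Nat.succ_mul, List.range_add, List.map_append, pv_seg g a n, List.range_succ,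
      List.flatMap_append]
    simp [List.map_map, Function.comp]

-- Decoding the flat index inside one block recovers the coordinates.
theorem pv_decode (N q y x : ℕ) (hy : y < N) (hx : x < N) :
    ([(((q * (N * N) + (y * N + x)) % N : ℕ) : Int),
      ((((q * (N * N) + (y * N + x)) / N) % N : ℕ) : Int),
      (((q * (N * N) + (y * N + x)) / (N * N) : ℕ) : Int)] : List Int)
      = [(x : Int), (y : Int), (q : Int)] := by
  have hN : 0 < N := by omega
  have e : q * (N * N) + (y * N + x) = N * (q * N + y) + x := by ring
  rw [e]
  have hlt : y * N + x < N * N := by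
    calc y * N + x < y * N + N := by omega
    _ = (y + 1) * N := by ring
    _ ≤ N * N := Nat.mul_le_mul_right N (by omega)
  have h2 : (N * (q * N + y) + x) % N = x := by
    rw [Nat.mul_add_mod]; exact Nat.mod_eq_of_lt hx
  have h3 : (N * (q * N + y) + x) / N = q * N + y := by
    rw [Nat.mul_add_div hN, Nat.div_eq_of_lt hx, Nat.add_zero]
  have h4 : (q * N + y) % N = y := by
    rw [mul_comm, Nat.mul_add_mod]; exact Nat.mod_eq_of_lt hy
  have h6 : (N * (q * N + y) + x) / (N * N) = q := by
    rw [show N * (q * N + y) + x = N * N * q + (y * N + x) from by ring,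
      Nat.mul_add_div (by positivity), Nat.div_eq_of_lt hlt, Nat.add_zero]
  rw [h2, h3, h4, h6]

theorem create_points_in_cube_eq (cube : List Int) :
    create_points_in_cube cube = create_points_in_cube_alt cube := by
  unfold create_points_in_cube create_points_in_cube_alt
  simp only [PySem.List.foldl_append_singleton_eq_map, PySem.List.foldl_append_eq_flatMap,
    List.nil_append]
  set N := cube.length with hN
  have hcast : ((N : Int) * N * N) = ((N * (N * N) : ℕ) : Int) := by push_cast; ring
  rw [hcast, PySem.List.pyRange_zero_nat, PySem.List.pyRange_zero_nat]
  simp only [List.flatMap_map, List.map_map]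
  rw [pv_seg _ (N * N) N]
  apply List.flatMap_congr
  intro q hq
  rw [pv_seg _ N N]
  apply List.flatMap_congr
  intro y hy
  apply List.map_congr_left
  intro x hx
  have hy' := List.mem_range.mp hy
  have hx' := List.mem_range.mp hx
  have e1 : ((N : Int) * N) = ((N * N : ℕ) : Int) := by push_cast; ring
  rw [e1]
  simp only [Function.comp_apply, PySem.Int.mod_natCast, PySem.Int.floordiv_natCast]
  exact (pv_decode N q y x hy' hx').symm

-- ===== VERDICT (by name: the statement is the Claim_ definition above) =====
theorem create_points_in_cube_spec : Claim_equal_create_points_in_cube := by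
  intro cube _
  exact create_points_in_cube_eq cube
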